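-- pv_equiv track=rewrite | github.com/altescy/xallennlp | xallennlp/data/dataset_readers/scierc.py | _get_coref_labels
-- ===== SOURCE A (Python) =====
-- from typing import Any, Dict, Iterator, List, Tuple
--
-- def _get_coref_labels(
--     clusters: List[List[Tuple[int, int]]],
--     span_dict: Dict[Tuple[int, int], int],
-- ) -> List[int]:
--     cluster_dict = {}
--     if clusters is not None:
--         for cluster_id, cluster in enumerate(clusters):
--             for mention in cluster:
--                 cluster_dict[tuple(mention)] = cluster_id
--
--     coref_labels: List[int] = []
--     for mention in span_dict:
--         if coref_labels is not None:
--             coref_labels.append(cluster_dict.get(mention, -1))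
--
--     return coref_labels
-- ===== SOURCE B (Python) =====
-- def _get_coref_labels(clusters, span_dict):
--     # Index-free rewrite: for each span, scan the clusters directly and keep
--     # the id of the LAST cluster containing it (matching dict overwrite), -1 if none.
--     labels = []
--     for span in span_dict:
--         label = -1
--         for cluster_id, cluster in enumerate(clusters or []):
--             if span in [tuple(m) for m in cluster]:
--                 label = cluster_id
--         labels.append(label)
--     return labels
-- ===== Notes on version B (the rewrite author's own statement) =====
-- stated objective: alternative
-- what changed: Replaces A's 'build a mention->cluster_id dict then look each span up' by a direct per-span scan of the clusters that keeps the last matching cluster id (mirroring dict overwrite), with no intermediate index.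
import Mathlib
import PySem

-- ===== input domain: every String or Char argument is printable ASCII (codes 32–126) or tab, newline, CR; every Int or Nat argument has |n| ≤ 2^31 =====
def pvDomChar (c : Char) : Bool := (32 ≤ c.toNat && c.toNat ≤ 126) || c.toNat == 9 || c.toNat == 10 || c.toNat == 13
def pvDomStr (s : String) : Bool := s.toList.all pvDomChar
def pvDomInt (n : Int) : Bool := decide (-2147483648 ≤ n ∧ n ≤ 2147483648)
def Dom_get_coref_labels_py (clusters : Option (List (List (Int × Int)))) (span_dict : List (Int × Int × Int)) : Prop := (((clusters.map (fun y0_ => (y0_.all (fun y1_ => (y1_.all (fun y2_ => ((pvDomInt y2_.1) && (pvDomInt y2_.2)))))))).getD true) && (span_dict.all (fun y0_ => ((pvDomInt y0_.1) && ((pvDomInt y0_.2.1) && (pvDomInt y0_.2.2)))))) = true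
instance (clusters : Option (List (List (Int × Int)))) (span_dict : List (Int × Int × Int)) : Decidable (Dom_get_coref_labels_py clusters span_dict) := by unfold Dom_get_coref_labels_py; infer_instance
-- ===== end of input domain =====

-- B replaces A's 'build a mention->cluster_id dict, then look spans up' by a direct
-- per-span scan of the clusters keeping the last matching cluster id (alternative decomposition).
-- Iterating the Python dict span_dict yields its distinct keys in first-insertion order:
-- both ports model it as the deduped keys of the association list.

-- ===== PORT A =====
def get_coref_labels_py (clusters : Option (List (List (Int × Int)))) (span_dict : List (Int × Int × Int)) : List Int :=
  -- cluster_dict = {}; for cluster_id, cluster in enumerate(clusters): for mention in cluster: cluster_dict[mention] = cluster_id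
  let cluster_dict : PySem.Dict (Int × Int) Int :=
    match clusters with
    | none => PySem.Dict.empty
    | some cs =>
        (PySem.List.enumerate cs).foldl
          (fun d p => p.2.foldl (fun d m => d.insert m p.1) d) PySem.Dict.empty
  -- for mention in span_dict: coref_labels.append(cluster_dict.get(mention, -1))
  let keys := (PySem.Dict.ofList (span_dict.map (fun t => ((t.1, t.2.1), t.2.2)))).keys
  keys.foldl (fun acc m => acc ++ [cluster_dict.getD m (-1)]) []

-- ===== PORT B =====
-- label of one span: scan enumerate(clusters or []), keep the id of the last cluster containing it
def pvLabelOf (cs : List (List (Int × Int))) (m : Int × Int) : Int :=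
  (PySem.List.enumerate cs).foldl (fun label p => if m ∈ p.2 then p.1 else label) (-1)

def get_coref_labels_py_alt (clusters : Option (List (List (Int × Int)))) (span_dict : List (Int × Int × Int)) : List Int :=
  let cs := clusters.getD []
  ((PySem.Dict.ofList (span_dict.map (fun t => ((t.1, t.2.1), t.2.2)))).keys).map (pvLabelOf cs)

-- ===== PRECONDITION & SPEC =====
def Spec_get_coref_labels_py (clusters : Option (List (List (Int × Int)))) (span_dict : List (Int × Int × Int)) (out : List Int) : Prop := out = get_coref_labels_py_alt clusters span_dict
instance (clusters : Option (List (List (Int × Int)))) (span_dict : List (Int × Int × Int)) (out : List Int) : Decidable (Spec_get_coref_labels_py clusters span_dict out) := by unfold Spec_get_coref_labels_py; infer_instance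

-- ===== CLAIM (what is proved, stated in full; the proofs are below) =====
def Claim_equal_get_coref_labels_py : Prop := ∀ (clusters : Option (List (List (Int × Int)))) (span_dict : List (Int × Int × Int)), Dom_get_coref_labels_py clusters span_dict → Spec_get_coref_labels_py clusters span_dict (get_coref_labels_py clusters span_dict)

-- ===== LEMMAS AND PROOFS =====

-- inserting every mention of one cluster with value cid: lookup becomes
-- 'cid if the span is in the cluster, else the old value'
theorem pv_getD_insert_cluster (cluster : List (Int × Int)) (d : PySem.Dict (Int × Int) Int)
    (cid : Int) (m : Int × Int) :
    (cluster.foldl (fun d x => d.insert x cid) d).getD m (-1)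
      = if m ∈ cluster then cid else d.getD m (-1) := by
  induction cluster generalizing d with
  | nil => simp
  | cons c cs ih =>
      simp only [List.foldl_cons, ih, List.mem_cons]
      rw [PySem.Dict.getD_insert]
      by_cases h1 : m ∈ cs <;> by_cases h2 : m = c <;> simp [h1, h2]

-- folding whole clusters into the dict computes B's last-match scan
theorem pv_getD_build_eq_scan (l : List (Int × List (Int × Int)))
    (d : PySem.Dict (Int × Int) Int) (m : Int × Int) :
    (l.foldl (fun d p => p.2.foldl (fun d x => d.insert x p.1) d) d).getD m (-1)
      = l.foldl (fun label p => if m ∈ p.2 then p.1 else label) (d.getD m (-1)) := by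
  induction l generalizing d with
  | nil => rfl
  | cons p ps ih =>
      simp only [List.foldl_cons, ih, pv_getD_insert_cluster]

theorem pv_labelOf_eq (cs : List (List (Int × Int))) (m : Int × Int) :
    pvLabelOf cs m
      = ((PySem.List.enumerate cs).foldl
          (fun d p => p.2.foldl (fun d x => d.insert x p.1) d) PySem.Dict.empty).getD m (-1) := by
  rw [pv_getD_build_eq_scan]
  simp [pvLabelOf]

-- ===== VERDICT (by name: the statement is the Claim_ definition above) =====
theorem get_coref_labels_py_spec : Claim_equal_get_coref_labels_py := by
  intro clusters span_dict _
  unfold Spec_get_coref_labels_py get_coref_labels_py get_coref_labels_py_alt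
  rw [PySem.List.foldl_append_singleton_eq_map]
  cases clusters with
  | none =>
      simp [show pvLabelOf [] = fun _ => (-1 : Int) from rfl, List.map_const']
  | some cs => simp [pv_labelOf_eq]
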